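-- pv_equiv track=rewrite | github.com/fanxing-6/pdf2zh-skill | scripts/pdf2zh_skill/latex_ops.py | join_most_matching_braces
-- ===== SOURCE A (Python) =====
-- def join_most_matching_braces(translated: str, original: str) -> str:
--     trans_pos = 0
--     orig_pos = 0
--
--     def find_next(source: str, chars: set[str], start: int) -> tuple[int | None, str | None]:
--         pos = start
--         while pos < len(source):
--             if source[pos] in chars:
--                 return pos, source[pos]
--             pos += 1
--         return None, None
--
--     while True:
--         next_orig, char = find_next(original, {"{", "}"}, orig_pos)
--         if next_orig is None or char is None:
--             break
--         next_trans, _ = find_next(translated, {char}, trans_pos)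
--         if next_trans is None:
--             break
--         orig_pos = next_orig + 1
--         trans_pos = next_trans + 1
--     return translated[:trans_pos] + original[orig_pos:]
-- ===== SOURCE B (Python) =====
-- def join_most_matching_braces(translated: str, original: str) -> str:
--     # queue of original's braces, consumed greedily while scanning translated once
--     pending = [(i, c) for i, c in enumerate(original) if c in '{}']
--     trans_pos = 0
--     orig_pos = 0
--     for j, ch in enumerate(translated):
--         if pending and ch == pending[0][1]:
--             orig_pos = pending[0][0] + 1
--             trans_pos = j + 1
--             pending = pending[1:]
--     return translated[:trans_pos] + original[orig_pos:]
-- ===== Notes on version B (the rewrite author's own statement) =====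
-- stated objective: alternative
-- what changed: A loops over original's braces and re-searches translated for each one via a hand-written find_next helper; B inverts the traversal: it builds a queue of original's braces once and then makes a single left-to-right pass over translated, consuming the queue head whenever the scanned character matches it (greedy subsequence matching), so translated is scanned exactly once with no inner search.
import Mathlib
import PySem

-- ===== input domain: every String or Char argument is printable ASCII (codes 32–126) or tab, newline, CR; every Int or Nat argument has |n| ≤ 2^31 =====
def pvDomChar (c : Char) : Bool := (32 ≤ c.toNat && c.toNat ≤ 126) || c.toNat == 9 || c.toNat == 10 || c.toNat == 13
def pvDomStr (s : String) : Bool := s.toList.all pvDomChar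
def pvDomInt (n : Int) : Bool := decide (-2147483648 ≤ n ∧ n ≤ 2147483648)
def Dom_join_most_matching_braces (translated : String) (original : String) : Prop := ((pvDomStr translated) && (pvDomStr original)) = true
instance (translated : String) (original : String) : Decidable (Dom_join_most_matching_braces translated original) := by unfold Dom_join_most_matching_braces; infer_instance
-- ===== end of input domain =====

-- B inverts A's traversal: instead of looping over original's braces and searching translated
-- for each, it builds a queue of original's braces once and makes a single pass over translated,
-- consuming the queue head on a match; objective: alternative.

-- ===== PORT A =====
-- find_next: scan `source` from `pos` for the first character in `chars`
def findNextA (source : List Char) (chars : List Char) (pos : Nat) : Option (Nat × Char) :=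
  if h : pos < source.length then
    if source[pos] ∈ chars then some (pos, source[pos])
    else findNextA source chars (pos + 1)
  else none
termination_by source.length - pos

-- bounds fact cited by loopA's decreasing_by (termination only)
theorem findNextA_some_bounds (source chars : List Char) (pos : Nat) (i : Nat) (c : Char)
    (h : findNextA source chars pos = some (i, c)) : pos ≤ i ∧ i < source.length := by
  fun_induction findNextA source chars pos with
  | case1 pos h1 h2 => simp_all; omega
  | case2 pos h1 h2 ih => have := ih h; omega
  | case3 pos h1 => simp_all

-- the `while True` loop, state (trans_pos, orig_pos)
def loopA (t o : List Char) (tp op : Nat) : Nat × Nat :=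
  match h1 : findNextA o ['{', '}'] op with
  | none => (tp, op)
  | some (i, c) =>
    match findNextA t [c] tp with
    | none => (tp, op)
    | some (n, _) => loopA t o (n + 1) (i + 1)
termination_by o.length - op
decreasing_by have := findNextA_some_bounds o ['{', '}'] op i c h1; omega

def join_most_matching_braces (translated : String) (original : String) : String :=
  let t := translated.toList
  let o := original.toList
  let r := loopA t o 0 0
  -- translated[:trans_pos] + original[orig_pos:]; both positions are nonnegative, so take/drop are exact
  String.ofList (t.take r.1 ++ o.drop r.2)

-- ===== PORT B =====
-- the `for j, ch in enumerate(translated)` loop; state (pending, trans_pos, orig_pos)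
def loopB : List (Int × Char) → List (Int × Char) → Int → Int → Int × Int
  | [], _, tp, op => (tp, op)
  | (j, ch) :: rest, pending, tp, op =>
    match pending with
    | (i, c) :: ps => if ch = c then loopB rest ps (j + 1) (i + 1)
                      else loopB rest ((i, c) :: ps) tp op
    | [] => loopB rest [] tp op

def join_most_matching_braces_alt (translated : String) (original : String) : String :=
  let t := translated.toList
  let o := original.toList
  let pending := (PySem.List.enumerate o).filter (fun p => p.2 == '{' || p.2 == '}')
  let r := loopB (PySem.List.enumerate t) pending 0 0
  String.ofList (PySem.List.slice t none (some r.1) ++ PySem.List.slice o (some r.2) none)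

-- ===== PRECONDITION & SPEC =====
def Spec_join_most_matching_braces (translated : String) (original : String) (out : String) : Prop := out = join_most_matching_braces_alt translated original
instance (translated : String) (original : String) (out : String) : Decidable (Spec_join_most_matching_braces translated original out) := by unfold Spec_join_most_matching_braces; infer_instance

-- ===== CLAIM (what is proved, stated in full; the proofs are below) =====
def Claim_equal_join_most_matching_braces : Prop := ∀ (translated : String) (original : String), Dom_join_most_matching_braces translated original → Spec_join_most_matching_braces translated original (join_most_matching_braces translated original)

-- ===== LEMMAS AND PROOFS =====

-- the brace queue of `l`, indices starting at `s`
def EB (l : List Char) (s : Int) : List (Int × Char) :=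
  (PySem.List.enumerate l s).filter (fun p => p.2 == '{' || p.2 == '}')

theorem findA_idx (t : List Char) (c : Char) (p : Nat) :
    findNextA t [c] p = ((t.drop p).findIdx? (fun a => a == c)).map (fun n => (n + p, c)) := by
  fun_induction findNextA t [c] p with
  | case1 p h1 h2 =>
    simp at h2
    rw [List.drop_eq_getElem_cons h1, List.findIdx?_cons]
    simp [h2]
  | case2 p h1 h2 ih =>
    simp at h2
    rw [ih, List.drop_eq_getElem_cons h1, List.findIdx?_cons]
    simp only [beq_iff_eq, h2, if_false, Option.map_map]
    cases (t.drop (p + 1)).findIdx? (fun a => a == c) with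
    | none => rfl
    | some m => simp only [Option.map_some, Function.comp_apply]; congr 2; omega
  | case3 p h1 =>
    rw [List.drop_eq_nil_iff.mpr (by omega)]
    simp

theorem stepNone (o : List Char) (p : Nat) (h : findNextA o ['{', '}'] p = none) :
    EB (o.drop p) p = [] := by
  fun_induction findNextA o ['{', '}'] p with
  | case1 p h1 h2 => simp_all
  | case2 p h1 h2 ih =>
    simp at h2
    have hgoal : EB (o.drop p) (p : Int) = EB (o.drop (p + 1)) ((p : Int) + 1) := by
      rw [List.drop_eq_getElem_cons h1]
      simp only [EB, PySem.List.enumerate_cons, List.filter_cons]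
      simp [h2.1, h2.2]
    rw [hgoal]
    exact_mod_cast ih h
  | case3 p h1 =>
    rw [List.drop_eq_nil_iff.mpr (by omega)]
    simp [EB, PySem.List.enumerate_nil]

theorem stepSome (o : List Char) (p : Nat) (i : Nat) (c : Char)
    (h : findNextA o ['{', '}'] p = some (i, c)) :
    EB (o.drop p) p = ((i : Int), c) :: EB (o.drop (i + 1)) ((i : Int) + 1) := by
  fun_induction findNextA o ['{', '}'] p with
  | case1 p h1 h2 =>
    simp only [Option.some.injEq, Prod.mk.injEq] at h
    obtain ⟨hi, hc⟩ := h
    subst hi; subst hc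
    rw [List.drop_eq_getElem_cons h1]
    simp only [EB, PySem.List.enumerate_cons, List.filter_cons]
    have hpred : ((o[p] == '{' || o[p] == '}') : Bool) = true := by
      simp at h2; rcases h2 with h2 | h2 <;> simp [h2]
    rw [hpred]
    rfl
  | case2 p h1 h2 ih =>
    simp at h2
    have hgoal : EB (o.drop p) (p : Int) = EB (o.drop (p + 1)) ((p : Int) + 1) := by
      rw [List.drop_eq_getElem_cons h1]
      simp only [EB, PySem.List.enumerate_cons, List.filter_cons]
      simp [h2.1, h2.2]
    rw [hgoal]
    exact_mod_cast ih h
  | case3 p h1 => simp_all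

-- with an empty brace queue the scan changes nothing
theorem loopB_nil_pending (l : List (Int × Char)) (tp op : Int) :
    loopB l [] tp op = (tp, op) := by
  induction l with
  | nil => rfl
  | cons x rest ih => cases x; simp [loopB, ih]

-- if the expected brace never occurs in the scanned suffix, the state is unchanged
theorem loopB_no_match (xs : List Char) (a : Int) (c : Char) (i : Int)
    (ps : List (Int × Char)) (tp op : Int)
    (h : xs.findIdx? (fun x => x == c) = none) :
    loopB (PySem.List.enumerate xs a) ((i, c) :: ps) tp op = (tp, op) := by
  induction xs generalizing a with
  | nil => simp [PySem.List.enumerate_nil, loopB]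
  | cons x rest ih =>
    rw [List.findIdx?_cons] at h
    by_cases hx : x = c
    · simp [hx] at h
    · simp only [beq_iff_eq, hx, if_false] at h
      rw [PySem.List.enumerate_cons]
      simp only [loopB, hx, if_false]
      exact ih (a + 1) (by simpa using h)

-- scanning up to (and through) the first occurrence of the expected brace
theorem loopB_skip (xs : List Char) (a : Int) (c : Char) (m : Nat) (i : Int)
    (ps : List (Int × Char)) (tp op : Int)
    (h : xs.findIdx? (fun x => x == c) = some m) :
    loopB (PySem.List.enumerate xs a) ((i, c) :: ps) tp op =
      loopB (PySem.List.enumerate (xs.drop (m + 1)) (a + m + 1)) ps (a + m + 1) (i + 1) := by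
  induction xs generalizing a m with
  | nil => simp at h
  | cons x rest ih =>
    rw [List.findIdx?_cons] at h
    rw [PySem.List.enumerate_cons]
    by_cases hx : x = c
    · simp only [hx, beq_self_eq_true, if_true, Option.some.injEq] at h
      subst h
      simp [loopB, hx]
    · simp only [beq_iff_eq, hx, if_false] at h
      cases hm : rest.findIdx? (fun x => x == c) with
      | none => rw [hm] at h; simp at h
      | some m' =>
        rw [hm] at h
        simp only [Option.map_some, Option.some.injEq] at h
        subst h
        simp only [loopB, hx, if_false]
        rw [ih (a + 1) m' hm]
        have ed : rest.drop (m' + 1) = (x :: rest).drop (m' + 1 + 1) := rfl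
        have ea : a + 1 + (m' : Int) + 1 = a + ((m' + 1 : Nat) : Int) + 1 := by push_cast; ring
        rw [ed, ea]

theorem loopB_eq_loopA (t o : List Char) (tp p : Nat) :
    loopB (PySem.List.enumerate (t.drop tp) tp) (EB (o.drop p) p) tp p =
      (((loopA t o tp p).1 : Int), ((loopA t o tp p).2 : Int)) := by
  fun_induction loopA t o tp p with
  | case1 tp p h1 =>
    rw [stepNone o p h1, loopB_nil_pending]
  | case2 tp p i c h1 h2 =>
    rw [stepSome o p i c h1]
    rw [findA_idx] at h2
    cases hm : (t.drop tp).findIdx? (fun a => a == c) with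
    | some m => rw [hm] at h2; simp at h2
    | none =>
      rw [loopB_no_match (t.drop tp) tp c i _ tp p hm]
  | case3 tp p i c h1 n c' h2 ih =>
    rw [stepSome o p i c h1]
    rw [findA_idx] at h2
    cases hm : (t.drop tp).findIdx? (fun a => a == c) with
    | none => rw [hm] at h2; simp at h2
    | some m =>
      rw [hm] at h2
      simp only [Option.map_some, Option.some.injEq, Prod.mk.injEq] at h2
      obtain ⟨hn, _⟩ := h2
      rw [loopB_skip (t.drop tp) tp c m i _ tp p hm]
      have hb : findNextA t [c] tp = some (n, c) := by
        rw [findA_idx, hm]; simp [hn]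
      have hbd := findNextA_some_bounds t [c] tp n c hb
      have e0 : (t.drop tp).drop (m + 1) = t.drop (n + 1) := by
        rw [List.drop_drop]; congr 1; omega
      have e1 : (tp : Int) + m + 1 = ((n + 1 : Nat) : Int) := by omega
      have e2 : (i : Int) + 1 = ((i + 1 : Nat) : Int) := by omega
      rw [e0, e1, e2]
      exact ih

-- ===== VERDICT (by name: the statement is the Claim_ definition above) =====
theorem join_most_matching_braces_spec : Claim_equal_join_most_matching_braces := by
  intro translated original _
  unfold Spec_join_most_matching_braces join_most_matching_braces join_most_matching_braces_alt
  have key := loopB_eq_loopA translated.toList original.toList 0 0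
  simp only [List.drop_zero, Nat.cast_zero, EB] at key
  show String.ofList (translated.toList.take (loopA translated.toList original.toList 0 0).1 ++
        original.toList.drop (loopA translated.toList original.toList 0 0).2) =
      String.ofList (PySem.List.slice translated.toList none
          (some (loopB (PySem.List.enumerate translated.toList)
            ((PySem.List.enumerate original.toList).filter (fun p => p.2 == '{' || p.2 == '}')) 0 0).1) ++
        PySem.List.slice original.toList
          (some (loopB (PySem.List.enumerate translated.toList)
            ((PySem.List.enumerate original.toList).filter (fun p => p.2 == '{' || p.2 == '}')) 0 0).2) none)
  rw [key]
  rw [PySem.List.slice_to_natCast, PySem.List.slice_from_natCast]
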